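-- pv_equiv track=rewrite | github.com/YukihiroSM/Logika-Statics | library.py | get_business_by_group_course_id
-- ===== SOURCE A (Python) =====
-- COURSES_IDS = {
--     "programming": {
--         "python start": [2066, 1765, 1600, 1493, 853, 816, 796, 733, 706, 686, 683, 633, 410, 406, 361, 305, 277, 248, ],
--         "python pro": [2120, 2051, 1996, 1554, 1459, 854, 817, 783, 734, 405, 389, ],
--         "scratch": [810, 799, 582, 563, 468, 467, 466, 390, 385, ],
--         "gamedesign": [1962, 1948, 1602, 1601, 1371, 902, 901, 809, 707, ],
--         "graphdesign": [2078, 1995, 1543, 1484, 1387, ],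
--         "websites": [1957, 1818, 1604, 1603, 797, 716, ],
--         "comp_gram": [1398, 897, 896, 777, 729, 606, 603, 465, 417, 408, ],
--         "video_blogging": [1571, 1570, 1386, ],
--         "unity": [1710, 1688, 1686, ]
--     },
--     "english": [2184, 2069, 2054, 1865, 1864, 1833, 1825, 1809, 1805]
-- }
--
-- def get_business_by_group_course_id(lms_course):
--     if lms_course in COURSES_IDS["english"]:
--         return "english"
--     else:
--         for key in COURSES_IDS["programming"]:
--             if lms_course in COURSES_IDS["programming"][key]:
--                 return "programming"
--     return "unknown"
-- ===== SOURCE B (Python) =====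
-- # Flat reverse-lookup table: each course id maps directly to its business
-- # category; the ids were read off COURSES_IDS (english and programming ids
-- # are disjoint there, so precedence is moot).
-- CATEGORY_BY_ID = {
--     248: "programming", 277: "programming", 305: "programming", 361: "programming",
--     385: "programming", 389: "programming", 390: "programming", 405: "programming",
--     406: "programming", 408: "programming", 410: "programming", 417: "programming",
--     465: "programming", 466: "programming", 467: "programming", 468: "programming",
--     563: "programming", 582: "programming", 603: "programming", 606: "programming",
--     633: "programming", 683: "programming", 686: "programming", 706: "programming",
--     707: "programming", 716: "programming", 729: "programming", 733: "programming",
--     734: "programming", 777: "programming", 783: "programming", 796: "programming",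
--     797: "programming", 799: "programming", 809: "programming", 810: "programming",
--     816: "programming", 817: "programming", 853: "programming", 854: "programming",
--     896: "programming", 897: "programming", 901: "programming", 902: "programming",
--     1371: "programming", 1386: "programming", 1387: "programming", 1398: "programming",
--     1459: "programming", 1484: "programming", 1493: "programming", 1543: "programming",
--     1554: "programming", 1570: "programming", 1571: "programming", 1600: "programming",
--     1601: "programming", 1602: "programming", 1603: "programming", 1604: "programming",
--     1686: "programming", 1688: "programming", 1710: "programming", 1765: "programming",
--     1805: "english", 1809: "english", 1818: "programming", 1825: "english",
--     1833: "english", 1864: "english", 1865: "english", 1948: "programming",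
--     1957: "programming", 1962: "programming", 1995: "programming", 1996: "programming",
--     2051: "programming", 2054: "english", 2066: "programming", 2069: "english",
--     2078: "programming", 2120: "programming", 2184: "english",
-- }
--
-- def get_business_by_group_course_id(lms_course):
--     return CATEGORY_BY_ID.get(lms_course, "unknown")
-- ===== Notes on version B (the rewrite author's own statement) =====
-- stated objective: idiomatic
-- what changed: Replaces the per-call scan of the english list plus a loop over nine programming id lists with one flat literal reverse-lookup table (id -> category, disjoint id sets) queried by a single dict.get.
import Mathlib
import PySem

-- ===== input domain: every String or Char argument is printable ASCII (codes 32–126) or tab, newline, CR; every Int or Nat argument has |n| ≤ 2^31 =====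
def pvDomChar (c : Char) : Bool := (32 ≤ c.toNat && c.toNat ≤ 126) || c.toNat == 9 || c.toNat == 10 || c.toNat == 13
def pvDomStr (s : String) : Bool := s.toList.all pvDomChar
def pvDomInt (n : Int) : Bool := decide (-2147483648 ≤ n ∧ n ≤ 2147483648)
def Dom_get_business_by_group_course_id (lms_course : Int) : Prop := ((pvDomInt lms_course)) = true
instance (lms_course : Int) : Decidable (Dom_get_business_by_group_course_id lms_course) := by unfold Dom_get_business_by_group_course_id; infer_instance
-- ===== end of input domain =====

-- B replaces A's per-call nested scans of COURSES_IDS with one literal reverse-lookup table (id -> category) queried by dict.get; idiomatic rewrite.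


-- ===== PORT A =====
-- the module constant COURSES_IDS (used only by A)
def pvEnglish : List Int := [2184, 2069, 2054, 1865, 1864, 1833, 1825, 1809, 1805]
def pvProgramming : List (String × List Int) :=
  [ ("python start", [2066, 1765, 1600, 1493, 853, 816, 796, 733, 706, 686, 683, 633, 410, 406, 361, 305, 277, 248]),
    ("python pro", [2120, 2051, 1996, 1554, 1459, 854, 817, 783, 734, 405, 389]),
    ("scratch", [810, 799, 582, 563, 468, 467, 466, 390, 385]),
    ("gamedesign", [1962, 1948, 1602, 1601, 1371, 902, 901, 809, 707]),
    ("graphdesign", [2078, 1995, 1543, 1484, 1387]),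
    ("websites", [1957, 1818, 1604, 1603, 797, 716]),
    ("comp_gram", [1398, 897, 896, 777, 729, 606, 603, 465, 417, 408]),
    ("video_blogging", [1571, 1570, 1386]),
    ("unity", [1710, 1688, 1686]) ]

-- A's for-loop over the keys of COURSES_IDS["programming"]: early return "programming" = some
def pvLoopA : List (String × List Int) → Int → Option String
  | [], _ => none
  | kv :: rest, x => if x ∈ kv.2 then some "programming" else pvLoopA rest x

def get_business_by_group_course_id (lms_course : Int) : String :=
  if lms_course ∈ pvEnglish then "english"
  else (pvLoopA pvProgramming lms_course).getD "unknown"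

-- ===== PORT B =====
-- B's module-level literal CATEGORY_BY_ID (Source B writes it out as a dict literal)
def pvCategoryById : PySem.Dict Int String := PySem.Dict.ofList [
    (248, "programming"), (277, "programming"), (305, "programming"),
    (361, "programming"), (385, "programming"), (389, "programming"),
    (390, "programming"), (405, "programming"), (406, "programming"),
    (408, "programming"), (410, "programming"), (417, "programming"),
    (465, "programming"), (466, "programming"), (467, "programming"),
    (468, "programming"), (563, "programming"), (582, "programming"),
    (603, "programming"), (606, "programming"), (633, "programming"),
    (683, "programming"), (686, "programming"), (706, "programming"),
    (707, "programming"), (716, "programming"), (729, "programming"),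
    (733, "programming"), (734, "programming"), (777, "programming"),
    (783, "programming"), (796, "programming"), (797, "programming"),
    (799, "programming"), (809, "programming"), (810, "programming"),
    (816, "programming"), (817, "programming"), (853, "programming"),
    (854, "programming"), (896, "programming"), (897, "programming"),
    (901, "programming"), (902, "programming"), (1371, "programming"),
    (1386, "programming"), (1387, "programming"), (1398, "programming"),
    (1459, "programming"), (1484, "programming"), (1493, "programming"),
    (1543, "programming"), (1554, "programming"), (1570, "programming"),
    (1571, "programming"), (1600, "programming"), (1601, "programming"),
    (1602, "programming"), (1603, "programming"), (1604, "programming"),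
    (1686, "programming"), (1688, "programming"), (1710, "programming"),
    (1765, "programming"), (1805, "english"), (1809, "english"),
    (1818, "programming"), (1825, "english"), (1833, "english"),
    (1864, "english"), (1865, "english"), (1948, "programming"),
    (1957, "programming"), (1962, "programming"), (1995, "programming"),
    (1996, "programming"), (2051, "programming"), (2054, "english"),
    (2066, "programming"), (2069, "english"), (2078, "programming"),
    (2120, "programming"), (2184, "english") ]

def get_business_by_group_course_id_alt (lms_course : Int) : String :=
  pvCategoryById.getD lms_course "unknown"

-- ===== PRECONDITION & SPEC =====
def Spec_get_business_by_group_course_id (lms_course : Int) (out : String) : Prop := out = get_business_by_group_course_id_alt lms_course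
instance (lms_course : Int) (out : String) : Decidable (Spec_get_business_by_group_course_id lms_course out) := by unfold Spec_get_business_by_group_course_id; infer_instance

-- ===== CLAIM =====
def Claim_equal_get_business_by_group_course_id : Prop := ∀ (lms_course : Int), Dom_get_business_by_group_course_id lms_course → Spec_get_business_by_group_course_id lms_course (get_business_by_group_course_id lms_course)

-- ===== LEMMAS AND PROOFS =====
-- all course ids that appear anywhere in COURSES_IDS
def pvAllIds : List Int := pvEnglish ++ pvProgramming.flatMap (·.2)

lemma pvLoopA_none (x : Int) (ps : List (String × List Int))
    (h : ∀ kv ∈ ps, x ∉ kv.2) : pvLoopA ps x = none := by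
  induction ps with
  | nil => rfl
  | cons kv rest ih =>
      simp only [pvLoopA, if_neg (h kv (List.mem_cons_self ..))]
      exact ih fun kv' hm => h kv' (List.mem_cons_of_mem _ hm)

set_option maxRecDepth 8192 in
set_option maxHeartbeats 2000000 in
lemma pvKeys_sub : ∀ k ∈ pvCategoryById.keys, k ∈ pvAllIds := by decide

set_option maxRecDepth 8192 in
set_option maxHeartbeats 4000000 in
lemma pvAgree : ∀ k ∈ pvAllIds, get_business_by_group_course_id k = get_business_by_group_course_id_alt k := by decide

set_option maxRecDepth 8192 in
set_option maxHeartbeats 4000000 in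
theorem get_business_by_group_course_id_spec : Claim_equal_get_business_by_group_course_id := by
  intro x _
  unfold Spec_get_business_by_group_course_id
  by_cases h : x ∈ pvAllIds
  · exact pvAgree x h
  · have he : x ∉ pvEnglish := fun hm => h (List.mem_append_left _ hm)
    have hp : ∀ kv ∈ pvProgramming, x ∉ kv.2 := fun kv hkv hx =>
      h (List.mem_append_right _ (List.mem_flatMap.mpr ⟨kv, hkv, hx⟩))
    have hk : pvCategoryById.contains x = false := by
      rw [PySem.Dict.contains_eq_decide_mem_keys]
      exact decide_eq_false fun hm => h (pvKeys_sub x hm)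
    rw [get_business_by_group_course_id_alt, PySem.Dict.getD_of_not_contains _ _ hk,
        get_business_by_group_course_id, if_neg he, pvLoopA_none x _ hp]
    rfl
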